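-- pv_equiv track=rewrite | github.com/howtocuddle/ddc-automation | fix_hierarchy_bruteforce_ranges_tables.py | immediate_children_simple
-- ===== SOURCE A (Python) =====
-- from typing import Dict, List, Set, Tuple
--
-- def immediate_children_simple(codes: List[str]) -> Dict[str, Set[str]]:
--     """Find immediate children for simple (non-range) codes."""
--     children: Dict[str, Set[str]] = {c: set() for c in codes}
--     for c in codes:
--         if '--' in c:  # skip range codes
--             continue
--
--         # For table codes, look for immediate extensions
--         # E.g., "-09" is parent of "-092", "-093", etc.
--         for d in codes:
--             if d == c or '--' in d:
--                 continue
--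
--             # Check if d is an immediate child of c
--             if d.startswith(c) and len(d) > len(c):
--                 remainder = d[len(c):]
--                 # Immediate child if remainder has no further structure
--                 # For tables, this means remainder should be just digits
--                 if remainder.isdigit() and len(remainder) <= 3:  # reasonable limit
--                     children[c].add(d)
--
--     return children
-- ===== SOURCE B (Python) =====
-- def immediate_children_simple(codes):
--     """Find immediate children for simple (non-range) codes.
--
--     One pass: index the codes in a set, and for each non-range code strip a
--     1-3 digit suffix and attach it to the parent found by lookup."""
--     children = {c: set() for c in codes}
--     present = set(children)
--     for d in codes:
--         if '--' in d:
--             continue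
--         for k in (1, 2, 3):
--             if k <= len(d) and d[len(d) - k:].isdigit():
--                 parent = d[:len(d) - k]
--                 if parent in present:
--                     children[parent].add(d)
--     return children
-- ===== Notes on version B (the rewrite author's own statement) =====
-- stated objective: faster
-- what changed: Instead of testing every ordered pair of codes for the parent/child relation, B makes one pass over the codes and, for each non-range code, strips a 1-3 digit suffix and looks the resulting parent up in a set of all codes.
import Mathlib
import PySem

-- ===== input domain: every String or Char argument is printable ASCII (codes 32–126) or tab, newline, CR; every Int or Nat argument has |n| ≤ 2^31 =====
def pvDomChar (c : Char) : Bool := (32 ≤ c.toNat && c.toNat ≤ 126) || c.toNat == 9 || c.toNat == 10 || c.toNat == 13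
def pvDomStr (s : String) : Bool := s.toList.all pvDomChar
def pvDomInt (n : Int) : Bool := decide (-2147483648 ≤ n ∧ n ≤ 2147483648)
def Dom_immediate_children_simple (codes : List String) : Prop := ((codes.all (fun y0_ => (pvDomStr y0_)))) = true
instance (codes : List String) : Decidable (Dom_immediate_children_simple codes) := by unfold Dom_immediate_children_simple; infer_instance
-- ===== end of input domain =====

-- B replaces A's all-pairs scan by a single pass that strips 1-3 digit suffixes and looks the parent up in a set (objective: faster).
-- Both ports return the dict as its association list (.items); set values are PySem.Set lists in first-insertion order.

-- ===== PORT A =====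
-- children[c].add(d) is ported as Dict.modify c ∅ (·.add d); the key c is always present (c ∈ codes), so the default is never used.
def immediate_children_simple (codes : List String) : List (String × List String) :=
  let children : PySem.Dict String (PySem.Set String) :=
    codes.foldl (fun d c => d.insert c PySem.Set.empty) PySem.Dict.empty    -- {c: set() for c in codes}
  let children :=
    codes.foldl (fun ch c =>
      if PySem.Str.isIn "--" c then ch                                      -- skip range codes
      else
        codes.foldl (fun ch d =>
          if d == c || PySem.Str.isIn "--" d then ch
          else
            if PySem.Str.startswith d c && decide (PySem.Str.len d > PySem.Str.len c) then
              let remainder := PySem.Str.slice d (some (PySem.Str.len c)) none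
              if PySem.Str.strIsdigit remainder && decide (PySem.Str.len remainder ≤ 3) then
                ch.modify c PySem.Set.empty (fun s => PySem.Set.add s d)    -- children[c].add(d)
              else ch
            else ch) ch) children
  children.items

-- ===== PORT B =====
def immediate_children_simple_alt (codes : List String) : List (String × List String) :=
  let children : PySem.Dict String (PySem.Set String) :=
    codes.foldl (fun d c => d.insert c PySem.Set.empty) PySem.Dict.empty    -- {c: set() for c in codes}
  let present : PySem.Set String := PySem.Set.ofList children.keys         -- set(children)
  let children :=
    codes.foldl (fun ch d =>
      if PySem.Str.isIn "--" d then ch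
      else
        [(1 : Int), 2, 3].foldl (fun ch k =>
          if decide (k ≤ PySem.Str.len d) &&
             PySem.Str.strIsdigit (PySem.Str.slice d (some (PySem.Str.len d - k)) none) then
            let parent := PySem.Str.slice d none (some (PySem.Str.len d - k))
            if PySem.Set.contains present parent then
              ch.modify parent PySem.Set.empty (fun s => PySem.Set.add s d) -- children[parent].add(d)
            else ch
          else ch) ch) children
  children.items

-- ===== PRECONDITION & SPEC =====
def Spec_immediate_children_simple (codes : List String) (out : List (String × List String)) : Prop := out = immediate_children_simple_alt codes
instance (codes : List String) (out : List (String × List String)) : Decidable (Spec_immediate_children_simple codes out) := by unfold Spec_immediate_children_simple; infer_instance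

-- ===== CLAIM (what is proved, stated in full; the proofs are below) =====
def Claim_equal_immediate_children_simple : Prop := ∀ (codes : List String), Dom_immediate_children_simple codes → Spec_immediate_children_simple codes (immediate_children_simple codes)

-- ===== LEMMAS AND PROOFS =====

-- abbreviations for the proofs
def pvRng (s : String) : Bool := PySem.Str.isIn "--" s

def pvMk (ks : List String) (F : String → PySem.Set String) : PySem.Dict String (PySem.Set String) :=
  ⟨ks.map (fun x => (x, F x))⟩

-- the condition under which A's inner loop adds d to children[c]
def pvPA (c d : String) : Bool :=
  !(d == c || pvRng d) &&
  ((PySem.Str.startswith d c && decide (PySem.Str.len d > PySem.Str.len c)) &&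
   (PySem.Str.strIsdigit (PySem.Str.slice d (some (PySem.Str.len c)) none) &&
    decide (PySem.Str.len (PySem.Str.slice d (some (PySem.Str.len c)) none) ≤ 3)))

def pvCondB (d : String) (k : Int) : Bool :=
  decide (k ≤ PySem.Str.len d) &&
  PySem.Str.strIsdigit (PySem.Str.slice d (some (PySem.Str.len d - k)) none)

def pvParent (d : String) (k : Int) : String :=
  PySem.Str.slice d none (some (PySem.Str.len d - k))

-- the condition under which B's pass adds d to children[c]
def pvPB (c d : String) : Bool :=
  !pvRng d && ([(1 : Int), 2, 3].any (fun k => pvCondB d k && (pvParent d k == c)))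

lemma pvMk_congr {ks : List String} {F G : String → PySem.Set String}
    (h : ∀ x ∈ ks, F x = G x) : pvMk ks F = pvMk ks G := by
  unfold pvMk
  exact congrArg PySem.Dict.mk (List.map_congr_left (fun x hx => by rw [h x hx]))

-- inserting an empty set for a key into an all-empty dict adds the key (Python dict-comprehension step)
lemma pv_insert_empty (ks : List String) (c : String) :
    (pvMk ks (fun _ => PySem.Set.empty)).insert c PySem.Set.empty
      = pvMk (PySem.Set.add ks c) (fun _ => PySem.Set.empty) := by
  by_cases hc : c ∈ ks
  · have hco : (pvMk ks (fun _ => PySem.Set.empty)).contains c = true := by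
      simp [pvMk, PySem.Dict.contains, List.any_map, Function.comp, beq_iff_eq]
      exact hc
    rw [PySem.Set.add_of_mem hc]
    unfold PySem.Dict.insert
    rw [hco, if_pos rfl]
    unfold pvMk
    congr 1
    rw [List.map_map]
    apply List.map_congr_left
    intro x hx
    by_cases hxc : x = c <;> simp [hxc]
  · have hco : (pvMk ks (fun _ => PySem.Set.empty)).contains c = false := by
      simp [pvMk, PySem.Dict.contains, List.any_map, Function.comp, beq_iff_eq]
      intro x hx hxc; exact hc (hxc ▸ hx)
    rw [PySem.Set.add_of_not_mem hc]
    unfold PySem.Dict.insert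
    rw [hco]
    simp [pvMk]

-- {c: set() for c in codes}
lemma pv_init (l ks : List String) :
    l.foldl (fun d c => d.insert c PySem.Set.empty) (pvMk ks (fun _ => PySem.Set.empty))
      = pvMk (PySem.Set.update ks l) (fun _ => PySem.Set.empty) := by
  induction l generalizing ks with
  | nil => rfl
  | cons c l ih => rw [List.foldl_cons, pv_insert_empty, PySem.Set.update, List.foldl_cons]; exact ih _

lemma pv_find (ks : List String) (c : String) (h : c ∈ ks) :
    ks.find? (fun x => x == c) = some c := by
  induction ks with
  | nil => cases h
  | cons x ks ih =>
    by_cases hx : x = c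
    · simp [List.find?, hx]
    · have hm : c ∈ ks := (List.mem_cons.mp h).resolve_left (fun hh => hx hh.symm)
      have hb : (x == c) = false := by simp [hx]
      simpa [List.find?, hb] using ih hm

-- children[c] = f(children[c]) on a dict with key list ks
lemma pv_modify (ks : List String) (F : String → PySem.Set String) (c : String)
    (g : PySem.Set String → PySem.Set String) (hc : c ∈ ks) :
    (pvMk ks F).modify c PySem.Set.empty g
      = pvMk ks (fun x => if x = c then g (F x) else F x) := by
  unfold PySem.Dict.modify
  have hget : (pvMk ks F).getD c PySem.Set.empty = F c := by
    simp [pvMk, PySem.Dict.getD, PySem.Dict.get?, List.find?_map, Function.comp_def,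
      pv_find ks c hc]
  rw [hget]
  have hco : (pvMk ks F).contains c = true := by
    simp [pvMk, PySem.Dict.contains, List.any_map, Function.comp, beq_iff_eq]
    exact hc
  unfold PySem.Dict.insert
  rw [hco, if_pos rfl]
  unfold pvMk
  congr 1
  rw [List.map_map]
  apply List.map_congr_left
  intro x hx
  by_cases hxc : x = c <;> simp [hxc]

-- update by a list all of whose members are already present is a no-op
lemma pv_update_idem (m : List String) (s : PySem.Set String) (h : ∀ x ∈ m, x ∈ s) :
    PySem.Set.update s m = s := by
  induction m generalizing s with
  | nil => rfl
  | cons x m ih =>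
    rw [PySem.Set.update, List.foldl_cons, PySem.Set.add_of_mem (h x (by simp))]
    exact ih s (fun y hy => h y (by simp [hy]))

lemma pv_update_append (s : List String) (xs : List String) (h : (s ++ xs).Nodup) :
    PySem.Set.update s xs = s ++ xs := by
  induction xs generalizing s with
  | nil => simp [PySem.Set.update]
  | cons x xs ih =>
    have hx : x ∉ s := fun hmem => (List.disjoint_of_nodup_append h) hmem (by simp)
    rw [PySem.Set.update, List.foldl_cons, PySem.Set.add_of_not_mem hx, ← PySem.Set.update]
    rw [ih (s ++ [x]) (by rw [List.append_cons] at h; exact h)]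
    simp

lemma pv_ofList_self (xs : List String) (h : xs.Nodup) : PySem.Set.ofList xs = xs := by
  have := pv_update_append [] xs (by simpa using h)
  simpa [PySem.Set.ofList, PySem.Set.update] using this

-- A's inner step as a single test
lemma pv_stepA (c : String) (ch : PySem.Dict String (PySem.Set String)) (d : String) :
    (if d == c || PySem.Str.isIn "--" d then ch
     else
       if PySem.Str.startswith d c && decide (PySem.Str.len d > PySem.Str.len c) then
         let remainder := PySem.Str.slice d (some (PySem.Str.len c)) none
         if PySem.Str.strIsdigit remainder && decide (PySem.Str.len remainder ≤ 3) then
           ch.modify c PySem.Set.empty (fun s => PySem.Set.add s d)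
         else ch
       else ch)
    = if pvPA c d then ch.modify c PySem.Set.empty (fun s => PySem.Set.add s d) else ch := by
  cases h1 : (d == c || PySem.Str.isIn "--" d)
  · cases h2 : (PySem.Str.startswith d c && decide (PySem.Str.len d > PySem.Str.len c))
    · simp only [pvPA, pvRng, h1, h2]; simp
    · cases h3 : (PySem.Str.strIsdigit (PySem.Str.slice d (some (PySem.Str.len c)) none) &&
          decide (PySem.Str.len (PySem.Str.slice d (some (PySem.Str.len c)) none) ≤ 3))
      · simp only [pvPA, pvRng, h1, h2, h3]; simp
      · simp only [pvPA, pvRng, h1, h2, h3]; simp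
  · simp only [pvPA, pvRng, h1]; simp

-- A's inner loop over a fixed c
lemma pv_innerA (l : List String) (ks : List String) (F : String → PySem.Set String)
    (c : String) (hc : c ∈ ks) :
    l.foldl (fun ch d =>
        if d == c || PySem.Str.isIn "--" d then ch
        else
          if PySem.Str.startswith d c && decide (PySem.Str.len d > PySem.Str.len c) then
            if PySem.Str.strIsdigit (PySem.Str.slice d (some (PySem.Str.len c)) none) &&
                decide (PySem.Str.len (PySem.Str.slice d (some (PySem.Str.len c)) none) ≤ 3) then
              ch.modify c PySem.Set.empty (fun s => PySem.Set.add s d)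
            else ch
          else ch) (pvMk ks F)
      = pvMk ks (fun x => if x = c then PySem.Set.update (F x) (l.filter (pvPA c)) else F x) := by
  induction l generalizing F with
  | nil => exact (pvMk_congr (fun x hx => by by_cases hxc : x = c <;> simp [hxc, PySem.Set.update])).symm
  | cons d l ih =>
    simp only [List.foldl_cons]
    rw [pv_stepA]
    by_cases hd : pvPA c d = true
    · rw [if_pos hd, pv_modify ks F c _ hc, ih]
      apply pvMk_congr
      intro x hx
      by_cases hxc : x = c <;>
        simp [hxc, hd, PySem.Set.update]
    · have hd' : pvPA c d = false := by revert hd; cases pvPA c d <;> simp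
      rw [if_neg (by simp [hd']), ih]
      apply pvMk_congr
      intro x hx
      by_cases hxc : x = c <;> simp [hxc, hd']

-- A's outer loop
lemma pv_outerA (cs : List String) (l : List String) (ks : List String)
    (F : String → PySem.Set String) (hsub : ∀ x ∈ l, x ∈ ks) :
    l.foldl (fun ch c =>
        if PySem.Str.isIn "--" c then ch
        else
          cs.foldl (fun ch d =>
            if d == c || PySem.Str.isIn "--" d then ch
            else
              if PySem.Str.startswith d c && decide (PySem.Str.len d > PySem.Str.len c) then
                if PySem.Str.strIsdigit (PySem.Str.slice d (some (PySem.Str.len c)) none) &&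
                    decide (PySem.Str.len (PySem.Str.slice d (some (PySem.Str.len c)) none) ≤ 3) then
                  ch.modify c PySem.Set.empty (fun s => PySem.Set.add s d)
                else ch
              else ch) ch) (pvMk ks F)
      = pvMk ks (fun x => if x ∈ l ∧ pvRng x = false
            then PySem.Set.update (F x) (cs.filter (pvPA x)) else F x) := by
  induction l generalizing F with
  | nil => exact (pvMk_congr (fun x hx => by simp)).symm
  | cons c l ih =>
    have hcks : c ∈ ks := hsub c (by simp)
    have hsub' : ∀ x ∈ l, x ∈ ks := fun x hx => hsub x (by simp [hx])
    simp only [List.foldl_cons]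
    by_cases hrc : PySem.Str.isIn "--" c = true
    · rw [if_pos hrc, ih _ hsub']
      apply pvMk_congr
      intro x hx
      by_cases hxc : x = c
      · subst hxc
        have : pvRng x = true := hrc
        simp [this]
      · simp [List.mem_cons, hxc]
    · have hrc' : pvRng c = false := by
        revert hrc; unfold pvRng; cases PySem.Str.isIn "--" c <;> simp
      rw [if_neg hrc, pv_innerA cs ks F c hcks, ih _ hsub']
      apply pvMk_congr
      intro x hx
      by_cases hxc : x = c
      · subst hxc
        by_cases hxl : x ∈ l
        · rw [if_pos (⟨hxl, hrc'⟩ : x ∈ l ∧ pvRng x = false),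
              if_pos (⟨by simp, hrc'⟩ : x ∈ x :: l ∧ pvRng x = false),
              if_pos rfl]
          exact pv_update_idem _ _ (fun y hy => (PySem.Set.mem_update _ _ y).mpr (Or.inr hy))
        · simp [hxl, hrc']
      · simp [hxc, List.mem_cons]

-- characterisation of A
lemma pv_A_char (codes : List String) :
    immediate_children_simple codes
      = (PySem.List.dedup codes).map
          (fun c => (c, if pvRng c then ([] : List String)
                        else PySem.Set.ofList (codes.filter (pvPA c)))) := by
  have h0 : (PySem.Dict.empty : PySem.Dict String (PySem.Set String))
      = pvMk [] (fun _ => PySem.Set.empty) := rfl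
  unfold immediate_children_simple
  simp only []
  rw [h0, pv_init,
    pv_outerA codes codes (PySem.Set.update [] codes) _
      (fun x hx => (PySem.Set.mem_ofList codes x).mpr hx),
    PySem.List.dedup_eq_ofList]
  apply List.map_congr_left
  intro c hcK
  have hcc : c ∈ codes := (PySem.Set.mem_ofList codes c).mp hcK
  by_cases hr : pvRng c = true
  · simp [hr]
  · have hr' : pvRng c = false := by revert hr; cases pvRng c <;> simp
    simp [hr', hcc, PySem.Set.ofList, PySem.Set.update, PySem.Set.empty]

-- B's inner loop over the suffix lengths
lemma pv_innerB (kl : List Int) (ks : List String) (F : String → PySem.Set String) (d : String) :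
    kl.foldl (fun ch k =>
        if decide (k ≤ PySem.Str.len d) &&
           PySem.Str.strIsdigit (PySem.Str.slice d (some (PySem.Str.len d - k)) none) then
          if PySem.Set.contains ks (PySem.Str.slice d none (some (PySem.Str.len d - k))) then
            ch.modify (PySem.Str.slice d none (some (PySem.Str.len d - k))) PySem.Set.empty
              (fun s => PySem.Set.add s d)
          else ch
        else ch) (pvMk ks F)
      = pvMk ks (fun x => if kl.any (fun k =>
              (decide (k ≤ PySem.Str.len d) &&
               PySem.Str.strIsdigit (PySem.Str.slice d (some (PySem.Str.len d - k)) none)) &&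
              (PySem.Str.slice d none (some (PySem.Str.len d - k)) == x))
            then PySem.Set.add (F x) d else F x) := by
  induction kl generalizing F with
  | nil => exact (pvMk_congr (fun x hx => by simp)).symm
  | cons k kl ih =>
    simp only [List.foldl_cons]
    by_cases hk : (decide (k ≤ PySem.Str.len d) &&
        PySem.Str.strIsdigit (PySem.Str.slice d (some (PySem.Str.len d - k)) none)) = true
    · rw [if_pos hk]
      by_cases hp : PySem.Set.contains ks (PySem.Str.slice d none (some (PySem.Str.len d - k))) = true
      · have hmem : PySem.Str.slice d none (some (PySem.Str.len d - k)) ∈ ks :=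
          (PySem.Set.contains_iff _ _).mp hp
        rw [if_pos hp, pv_modify ks F _ _ hmem, ih]
        apply pvMk_congr
        intro x hx
        by_cases hxp : x = PySem.Str.slice d none (some (PySem.Str.len d - k))
        · have hb : (PySem.Str.slice d none (some (PySem.Str.len d - k)) == x) = true := by
            simp [hxp]
          simp only [List.any_cons, hk, hb, Bool.true_and, Bool.true_or]
          rw [if_pos hxp, if_pos trivial,
            PySem.Set.add_of_mem ((PySem.Set.mem_add (F x) d d).mpr (Or.inr rfl)), ite_self]
        · have hb : (PySem.Str.slice d none (some (PySem.Str.len d - k)) == x) = false := by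
            simp; intro he; exact hxp he.symm
          simp only [List.any_cons, hk, hb, Bool.true_and, Bool.false_or]
          rw [if_neg hxp]
      · rw [if_neg hp, ih]
        apply pvMk_congr
        intro x hx
        have hb : (PySem.Str.slice d none (some (PySem.Str.len d - k)) == x) = false := by
          simp
          intro he
          exact hp ((PySem.Set.contains_iff _ _).mpr (he ▸ hx))
        simp only [List.any_cons, hb, Bool.and_false, Bool.false_or]
    · have hk' : (decide (k ≤ PySem.Str.len d) &&
          PySem.Str.strIsdigit (PySem.Str.slice d (some (PySem.Str.len d - k)) none)) = false := by
        revert hk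
        cases (decide (k ≤ PySem.Str.len d) &&
          PySem.Str.strIsdigit (PySem.Str.slice d (some (PySem.Str.len d - k)) none)) <;> simp
      rw [if_neg hk, ih]
      apply pvMk_congr
      intro x hx
      simp only [List.any_cons, hk', Bool.false_and, Bool.false_or]

-- B's single pass
lemma pv_outerB (l : List String) (ks : List String) (F : String → PySem.Set String) :
    l.foldl (fun ch d =>
        if PySem.Str.isIn "--" d then ch
        else
          [(1 : Int), 2, 3].foldl (fun ch k =>
            if decide (k ≤ PySem.Str.len d) &&
               PySem.Str.strIsdigit (PySem.Str.slice d (some (PySem.Str.len d - k)) none) then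
              if PySem.Set.contains ks (PySem.Str.slice d none (some (PySem.Str.len d - k))) then
                ch.modify (PySem.Str.slice d none (some (PySem.Str.len d - k))) PySem.Set.empty
                  (fun s => PySem.Set.add s d)
              else ch
            else ch) ch) (pvMk ks F)
      = pvMk ks (fun x => PySem.Set.update (F x) (l.filter (fun d => pvPB x d))) := by
  induction l generalizing F with
  | nil => exact (pvMk_congr (fun x hx => by simp [PySem.Set.update])).symm
  | cons d l ih =>
    rw [List.foldl_cons]
    by_cases hr : PySem.Str.isIn "--" d = true
    · rw [if_pos hr, ih]
      apply pvMk_congr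
      intro x hx
      have : pvPB x d = false := by
        simp only [pvPB, pvRng, hr, Bool.not_true, Bool.false_and]
      simp only [List.filter_cons, this]
      simp
    · rw [if_neg hr, pv_innerB [(1 : Int), 2, 3] ks F d, ih]
      apply pvMk_congr
      intro x hx
      have hr' : pvRng d = false := by
        revert hr; unfold pvRng; cases PySem.Str.isIn "--" d <;> simp
      have hpb : pvPB x d = [(1 : Int), 2, 3].any (fun k =>
          (decide (k ≤ PySem.Str.len d) &&
           PySem.Str.strIsdigit (PySem.Str.slice d (some (PySem.Str.len d - k)) none)) &&
          (PySem.Str.slice d none (some (PySem.Str.len d - k)) == x)) := by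
        simp only [pvPB, pvCondB, pvParent, hr', Bool.not_false, Bool.true_and]
      cases h3 : [(1 : Int), 2, 3].any (fun k =>
          (decide (k ≤ PySem.Str.len d) &&
           PySem.Str.strIsdigit (PySem.Str.slice d (some (PySem.Str.len d - k)) none)) &&
          (PySem.Str.slice d none (some (PySem.Str.len d - k)) == x))
      · simp only [List.filter_cons, hpb, h3]
        simp
      · simp only [List.filter_cons, hpb, h3]
        rw [if_pos trivial, if_pos trivial]
        rfl

-- characterisation of B
lemma pv_B_char (codes : List String) :
    immediate_children_simple_alt codes
      = (PySem.List.dedup codes).map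
          (fun c => (c, PySem.Set.ofList (codes.filter (fun d => pvPB c d)))) := by
  have h0 : (PySem.Dict.empty : PySem.Dict String (PySem.Set String))
      = pvMk [] (fun _ => PySem.Set.empty) := rfl
  have hkeys : (pvMk (PySem.Set.update [] codes) (fun _ => PySem.Set.empty)).keys
      = PySem.Set.update [] codes := by
    simp [pvMk, PySem.Dict.keys, List.map_map, Function.comp_def]
  have hnd : (PySem.Set.update ([] : List String) codes).Nodup := PySem.Set.nodup_ofList codes
  unfold immediate_children_simple_alt
  simp only []
  rw [h0, pv_init, hkeys, pv_ofList_self _ hnd,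
    pv_outerB codes (PySem.Set.update [] codes) _,
    PySem.List.dedup_eq_ofList]
  apply List.map_congr_left
  intro c hcK
  rfl

-- a prefix of a non-range code is non-range
lemma pv_rng_prefix {c d : String} (h : c.toList <+: d.toList) (hc : pvRng c = true) :
    pvRng d = true := by
  unfold pvRng at *
  simp only [PySem.Str.isIn_eq] at *
  rw [PySem.Chars.isIn_iff_infix] at *
  exact hc.trans h.isInfix

-- a slice d[:t] is a prefix of d
lemma pv_parent_case {c d : String} {t : ℤ} (ht : 0 ≤ t)
    (hpar : PySem.Str.slice d none (some t) = c) : c.toList <+: d.toList := by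
  have h := congrArg String.toList hpar
  simp only [PySem.Str.toList_slice, PySem.Chars.slice_eq_listSlice] at h
  rw [PySem.List.slice_to _ ht] at h
  exact h ▸ List.take_prefix _ _

-- B's suffix-strip hit of length t yields A's pair condition
lemma pv_B_to_A {c d : String} (t : ℕ) (h1 : 1 ≤ t) (h3 : t ≤ 3)
    (hrd : PySem.Chars.isIn ['-', '-'] d.toList = false)
    (hkn : t ≤ d.length)
    (hdg : PySem.Chars.strIsdigit (PySem.List.slice d.toList (some ((d.length : ℤ) - t))) = true)
    (hpar : PySem.Str.slice d none (some ((d.length : ℤ) - t)) = c) :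
    (¬ d = c ∧ PySem.Chars.isIn ['-', '-'] d.toList = false) ∧
    (PySem.Chars.startswith d.toList c.toList = true ∧ c.length < d.length) ∧
    PySem.Chars.strIsdigit (List.drop c.length d.toList) = true ∧ d.length ≤ 3 + c.length := by
  have ht0 : (0 : ℤ) ≤ (d.length : ℤ) - t := by omega
  have e : ((d.length : ℤ) - t) = ((d.length - t : ℕ) : ℤ) := by omega
  rw [e, PySem.List.slice_from_natCast] at hdg
  have hceq : c.toList = d.toList.take (d.length - t) := by
    have h := congrArg String.toList hpar
    simp only [PySem.Str.toList_slice, PySem.Chars.slice_eq_listSlice] at h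
    rw [e, PySem.List.slice_to_natCast] at h
    exact h.symm
  have hclen : c.length = d.length - t := by
    have h := congrArg List.length hceq
    simp only [List.length_take, String.length_toList] at h
    omega
  refine ⟨⟨?_, hrd⟩, ⟨?_, by omega⟩, ?_, by omega⟩
  · intro hEq
    rw [hEq] at hclen hkn
    omega
  · exact (PySem.Chars.startswith_iff _ _).mpr (by rw [hceq]; exact List.take_prefix _ _)
  · rw [hclen]
    exact hdg

-- the two add-conditions agree on non-range keys
lemma pv_pred_eq (c d : String) : pvPA c d = pvPB c d := by
  rw [Bool.eq_iff_iff]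
  simp only [pvPA, pvRng, PySem.Str.isIn_eq, Bool.not_or, PySem.Str.startswith_eq,
    PySem.Str.len_eq, String.length_toList, gt_iff_lt, Nat.cast_lt, PySem.Str.strIsdigit_eq,
    PySem.Str.toList_slice, PySem.Chars.slice_eq_listSlice, PySem.List.slice_from_natCast,
    List.length_drop, Nat.cast_le_ofNat, tsub_le_iff_right, Bool.and_eq_true,
    Bool.not_eq_eq_eq_not, Bool.not_true, beq_eq_false_iff_ne, ne_eq, decide_eq_true_eq,
    pvPB, pvCondB, pvParent, List.any_cons, Nat.one_le_cast, Nat.ofNat_le_cast, List.any_nil,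
    Bool.or_false, Bool.or_eq_true, beq_iff_eq]
  constructor
  · rintro ⟨⟨hdc, hrd⟩, ⟨hsw, hlen⟩, hdig, hle⟩
    refine ⟨hrd, ?_⟩
    have hpre : c.toList <+: d.toList := (PySem.Chars.startswith_iff _ _).mp hsw
    have htake : c.toList = d.toList.take c.toList.length := List.prefix_iff_eq_take.mp hpre
    rw [String.length_toList] at htake
    have hpar : PySem.Str.slice d none (some ((c.length : ℕ) : ℤ)) = c := by
      simp only [PySem.Str.slice, PySem.Chars.slice_eq_listSlice, PySem.List.slice_to_natCast]
      exact String.ofList_eq.mpr htake.symm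
    rcases (by omega : d.length = c.length + 1 ∨ d.length = c.length + 2 ∨
        d.length = c.length + 3) with h | h | h
    · refine Or.inl ⟨⟨by omega, ?_⟩, ?_⟩
      · rw [show ((d.length : ℤ) - 1) = ((c.length : ℕ) : ℤ) by omega,
          PySem.List.slice_from_natCast]
        exact hdig
      · rw [show ((d.length : ℤ) - 1) = ((c.length : ℕ) : ℤ) by omega]
        exact hpar
    · refine Or.inr (Or.inl ⟨⟨by omega, ?_⟩, ?_⟩)
      · rw [show ((d.length : ℤ) - 2) = ((c.length : ℕ) : ℤ) by omega,
          PySem.List.slice_from_natCast]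
        exact hdig
      · rw [show ((d.length : ℤ) - 2) = ((c.length : ℕ) : ℤ) by omega]
        exact hpar
    · refine Or.inr (Or.inr ⟨⟨by omega, ?_⟩, ?_⟩)
      · rw [show ((d.length : ℤ) - 3) = ((c.length : ℕ) : ℤ) by omega,
          PySem.List.slice_from_natCast]
        exact hdig
      · rw [show ((d.length : ℤ) - 3) = ((c.length : ℕ) : ℤ) by omega]
        exact hpar
  · rintro ⟨hrd, ⟨⟨hkn, hdg⟩, hpar⟩ | ⟨⟨hkn, hdg⟩, hpar⟩ | ⟨⟨hkn, hdg⟩, hpar⟩⟩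
    · exact pv_B_to_A 1 (by omega) (by omega) hrd hkn hdg hpar
    · exact pv_B_to_A 2 (by omega) (by omega) hrd hkn hdg hpar
    · exact pv_B_to_A 3 (by omega) (by omega) hrd hkn hdg hpar

theorem pv_main (codes : List String) :
    immediate_children_simple codes = immediate_children_simple_alt codes := by
  rw [pv_A_char, pv_B_char]
  apply List.map_congr_left
  intro c hc
  by_cases hrng : pvRng c = true
  · have : codes.filter (fun d => pvPB c d) = [] := by
      rw [List.filter_eq_nil_iff]
      intro d _ hd
      simp only [pvPB, pvCondB, pvParent, pvRng, PySem.Str.isIn_eq, PySem.Str.len_eq,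
        String.length_toList, PySem.Str.strIsdigit_eq, PySem.Str.toList_slice,
        PySem.Chars.slice_eq_listSlice, List.any_cons, Nat.one_le_cast, Nat.ofNat_le_cast,
        List.any_nil, Bool.or_false, Bool.and_eq_true, Bool.not_eq_eq_eq_not, Bool.not_true,
        Bool.or_eq_true, decide_eq_true_eq, beq_iff_eq] at hd
      obtain ⟨hrd, hdisj⟩ := hd
      have hpre : c.toList <+: d.toList := by
        rcases hdisj with ⟨⟨hkn, _⟩, hpar⟩ | ⟨⟨hkn, _⟩, hpar⟩ | ⟨⟨hkn, _⟩, hpar⟩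
        · exact pv_parent_case (by omega) hpar
        · exact pv_parent_case (by omega) hpar
        · exact pv_parent_case (by omega) hpar
      have hrngd := pv_rng_prefix hpre hrng
      simp only [pvRng, PySem.Str.isIn_eq] at hrngd
      rw [hrngd] at hrd
      exact absurd hrd (by simp)
    simp [hrng, this, PySem.Set.ofList, PySem.Set.empty]
  · have hc' : pvRng c = false := by revert hrng; cases pvRng c <;> simp
    have : codes.filter (pvPA c) = codes.filter (fun d => pvPB c d) := by
      apply List.filter_congr; intro d _; rw [pv_pred_eq c d]
    simp [hc', this]

-- ===== VERDICT (by name: the statement is the Claim_ definition above) =====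
theorem immediate_children_simple_spec : Claim_equal_immediate_children_simple := by
  intro codes _
  unfold Spec_immediate_children_simple
  exact pv_main codes
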